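-- pv_equiv track=rewrite | github.com/kikass13/pyfoobar | pcl_to_rgb_2dcamera/chunksSplit.py | split_array_indices
-- ===== SOURCE A (Python) =====
-- def split_array_indices(array_length, num_chunks):
--     # Calculate the size of each chunk
--     chunk_size = array_length // num_chunks
--     remainder = array_length % num_chunks
--
--     # Initialize start and end indices
--     start_index = 0
--     end_index = chunk_size + (1 if remainder > 0 else 0)
--
--     # Iterate to find the start and end indices for each chunk
--     indices_list = []
--     for _ in range(num_chunks):
--         indices_list.append((start_index, end_index))
--         start_index = end_index
--         end_index = start_index + chunk_size + (1 if remainder > 1 else 0)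
--         remainder -= 1
--     return indices_list
-- ===== SOURCE B (Python) =====
-- def split_array_indices(array_length, num_chunks):
--     # Balanced split: the first `remainder` chunks get one extra element.
--     # Each boundary is computed directly by closed form; no running state.
--     chunk_size = array_length // num_chunks
--     remainder = array_length % num_chunks
--     return [(i * chunk_size + min(i, remainder),
--              (i + 1) * chunk_size + min(i + 1, remainder))
--             for i in range(num_chunks)]
-- ===== Notes on version B (the rewrite author's own statement) =====
-- stated objective: simpler
-- what changed: Replaces A's stateful loop carrying start_index/end_index and a decremented remainder by a stateless comprehension computing each chunk's boundaries from its index via the closed form i*chunk_size + min(i, remainder).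
import Mathlib
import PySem

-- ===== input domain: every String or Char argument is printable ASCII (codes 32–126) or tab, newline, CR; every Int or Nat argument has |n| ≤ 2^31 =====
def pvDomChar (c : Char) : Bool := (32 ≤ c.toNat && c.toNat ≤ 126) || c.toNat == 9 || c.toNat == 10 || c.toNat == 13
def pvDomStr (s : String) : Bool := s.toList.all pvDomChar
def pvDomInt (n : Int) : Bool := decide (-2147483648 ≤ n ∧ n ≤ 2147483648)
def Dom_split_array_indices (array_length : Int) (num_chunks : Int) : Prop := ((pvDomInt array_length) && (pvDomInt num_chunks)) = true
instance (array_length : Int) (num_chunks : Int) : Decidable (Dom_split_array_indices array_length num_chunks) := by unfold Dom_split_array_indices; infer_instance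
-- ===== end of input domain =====

-- B replaces A's stateful loop (running start/end indices, decremented remainder) by a
-- stateless closed form per chunk index: same values, same cost, plainer code.

-- ===== PORT A =====
-- the loop of A: state is (start_index, end_index, remainder, indices_list)
def split_array_indices (array_length : Int) (num_chunks : Int) : List (Int × Int) :=
  let chunk_size := PySem.Int.floordiv array_length num_chunks
  let remainder := PySem.Int.mod array_length num_chunks
  let start_index : Int := 0
  let end_index : Int := chunk_size + (if remainder > 0 then 1 else 0)
  let final := (PySem.List.pyRange 0 num_chunks 1).foldl
    (fun (st : Int × Int × Int × List (Int × Int)) _ =>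
      let s := st.1
      let e := st.2.1
      let r := st.2.2.1
      let acc := st.2.2.2
      (e, e + chunk_size + (if r > 1 then 1 else 0), r - 1, acc ++ [(s, e)]))
    (start_index, end_index, remainder, [])
  final.2.2.2

-- ===== PORT B =====
def split_array_indices_alt (array_length : Int) (num_chunks : Int) : List (Int × Int) :=
  let chunk_size := PySem.Int.floordiv array_length num_chunks
  let remainder := PySem.Int.mod array_length num_chunks
  (PySem.List.pyRange 0 num_chunks 1).map
    (fun i => (i * chunk_size + min i remainder,
               (i + 1) * chunk_size + min (i + 1) remainder))

-- ===== PRECONDITION & SPEC =====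
-- Pre_ excludes exactly num_chunks = 0, where A raises ZeroDivisionError.
def Pre_split_array_indices (array_length : Int) (num_chunks : Int) : Prop := num_chunks ≠ 0
instance (array_length : Int) (num_chunks : Int) : Decidable (Pre_split_array_indices array_length num_chunks) := by unfold Pre_split_array_indices; infer_instance
def pvWitness_split_array_indices : Int × Int := (10, 3)

def Spec_split_array_indices (array_length : Int) (num_chunks : Int) (out : List (Int × Int)) : Prop := out = split_array_indices_alt array_length num_chunks
instance (array_length : Int) (num_chunks : Int) (out : List (Int × Int)) : Decidable (Spec_split_array_indices array_length num_chunks out) := by unfold Spec_split_array_indices; infer_instance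

-- ===== CLAIM (what is proved, stated in full; the proofs are below) =====
def Claim_equal_split_array_indices : Prop := ∀ (array_length : Int) (num_chunks : Int), Dom_split_array_indices array_length num_chunks → Pre_split_array_indices array_length num_chunks → Spec_split_array_indices array_length num_chunks (split_array_indices array_length num_chunks)

-- ===== LEMMAS AND PROOFS =====

-- The loop invariant: starting A's fold at chunk index k with the state the closed
-- form predicts, the fold produces acc followed by B's closed-form tuples.
theorem split_loop_eq (cs r0 n : Int) :
    ∀ (d : Nat) (k : Int), n - k = d → ∀ (acc : List (Int × Int)),
    ((PySem.List.pyRange k n 1).foldl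
      (fun (st : Int × Int × Int × List (Int × Int)) _ =>
        let s := st.1
        let e := st.2.1
        let r := st.2.2.1
        let a := st.2.2.2
        (e, e + cs + (if r > 1 then 1 else 0), r - 1, a ++ [(s, e)]))
      (k * cs + min k r0, (k + 1) * cs + min (k + 1) r0, r0 - k, acc)).2.2.2
    = acc ++ (PySem.List.pyRange k n 1).map
        (fun i => (i * cs + min i r0, (i + 1) * cs + min (i + 1) r0)) := by
  intro d
  induction d with
  | zero =>
    intro k hk acc
    rw [PySem.List.pyRange_one_eq_nil (by omega)]
    simp
  | succ m ih =>
    intro k hk acc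
    rw [PySem.List.pyRange_one_cons (by omega)]
    simp only [List.foldl_cons, List.map_cons]
    have h2 : (k + 1) * cs + min (k + 1) r0 + cs + (if r0 - k > 1 then 1 else 0)
        = (k + 1 + 1) * cs + min (k + 1 + 1) r0 := by
      have : min (k + 1 + 1) r0 = min (k + 1) r0 + (if r0 - k > 1 then 1 else 0) := by
        split_ifs <;> omega
      rw [this]; ring
    have h3 : r0 - k - 1 = r0 - (k + 1) := by ring
    rw [h2, h3, ih (k + 1) (by omega)]
    simp

theorem split_array_indices_eq (array_length num_chunks : Int) (h : num_chunks ≠ 0) :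
    split_array_indices array_length num_chunks = split_array_indices_alt array_length num_chunks := by
  unfold split_array_indices split_array_indices_alt
  rcases lt_or_gt_of_ne h with hn | hn
  · rw [PySem.List.pyRange_one_eq_nil (by omega)]
    simp
  · have hr : 0 ≤ PySem.Int.mod array_length num_chunks := PySem.Int.mod_nonneg _ hn
    set cs := PySem.Int.floordiv array_length num_chunks
    set r0 := PySem.Int.mod array_length num_chunks
    have h0 : (0 : Int) * cs + min 0 r0 = 0 := by
      have : min (0 : Int) r0 = 0 := by omega
      rw [this]; ring
    have h1 : cs + (if r0 > 0 then 1 else 0) = (0 + 1 : Int) * cs + min (0 + 1) r0 := by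
      have : min (0 + 1 : Int) r0 = if r0 > 0 then 1 else 0 := by split_ifs <;> omega
      rw [this]; ring
    have key := split_loop_eq cs r0 num_chunks num_chunks.toNat 0 (by omega) []
    rw [h0] at key
    simp only [sub_zero] at key
    simp only []
    rw [h1]
    exact key.trans (by simp)

-- ===== VERDICT (by name: the statement is the Claim_ definition above) =====
theorem split_array_indices_spec : Claim_equal_split_array_indices := by
  intro a n _ hp
  exact split_array_indices_eq a n hp
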